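-- pv_equiv track=rewrite | github.com/demisto/content | Packs/Core/Integrations/CortexCoreIR/CortexCoreIR.py | sort_by_key
-- ===== SOURCE A (Python) =====
-- from operator import itemgetter
--
-- def sort_by_key(list_to_sort, main_key, fallback_key):
--     """Sorts a given list elements by main_key for all elements with the key,
--     uses sorting by fallback_key on all elements that dont have the main_key"""
--     list_elements_with_main_key = [element for element in list_to_sort if element.get(main_key)]
--     sorted_list = sorted(list_elements_with_main_key, key=itemgetter(main_key))
--     if len(list_to_sort) == len(sorted_list):
--         return sorted_list
--
--     list_elements_with_fallback_without_main = [element for element in list_to_sort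
--                                                 if element.get(fallback_key) and not element.get(main_key)]
--     sorted_list.extend(sorted(list_elements_with_fallback_without_main, key=itemgetter(fallback_key)))
--
--     if len(sorted_list) == len(list_to_sort):
--         return sorted_list
--
--     list_elements_without_fallback_and_main = [element for element in list_to_sort
--                                                if not element.get(fallback_key) and not element.get(main_key)]
--
--     sorted_list.extend(list_elements_without_fallback_and_main)
--     return sorted_list
-- ===== SOURCE B (Python) =====
-- def sort_by_key(list_to_sort, main_key, fallback_key):
--     """Single stable sort with a composite priority key: (0, main value) if the
--     main key is truthy, (1, fallback value) if only the fallback key is truthy,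
--     (2, '') otherwise; stability keeps the last group in input order."""
--     def sort_key(element):
--         main_value = element.get(main_key)
--         if main_value:
--             return (0, main_value)
--         fallback_value = element.get(fallback_key)
--         if fallback_value:
--             return (1, fallback_value)
--         return (2, '')
--     return sorted(list_to_sort, key=sort_key)
-- ===== Notes on version B (the rewrite author's own statement) =====
-- stated objective: simpler
-- what changed: Replaces A's three-way partition into separate lists, two separate sorts, two concatenations and two early-return length checks by one stable sorted() call with a composite (priority, value) key.
import Mathlib
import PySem

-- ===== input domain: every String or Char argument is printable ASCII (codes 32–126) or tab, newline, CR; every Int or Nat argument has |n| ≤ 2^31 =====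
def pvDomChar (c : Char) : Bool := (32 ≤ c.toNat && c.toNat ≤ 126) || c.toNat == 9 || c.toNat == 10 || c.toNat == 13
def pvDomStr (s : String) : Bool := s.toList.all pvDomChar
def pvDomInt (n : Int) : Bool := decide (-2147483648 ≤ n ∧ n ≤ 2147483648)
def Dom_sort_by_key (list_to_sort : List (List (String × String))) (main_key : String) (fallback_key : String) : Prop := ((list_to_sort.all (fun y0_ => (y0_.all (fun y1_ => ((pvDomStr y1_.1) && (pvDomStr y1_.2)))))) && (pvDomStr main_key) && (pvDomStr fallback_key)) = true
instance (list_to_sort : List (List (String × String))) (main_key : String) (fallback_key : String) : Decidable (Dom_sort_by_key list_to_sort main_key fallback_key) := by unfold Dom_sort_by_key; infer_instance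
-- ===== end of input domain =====

-- B replaces A's partition/sort/concatenate with one stable composite-key sort (objective: simpler).


-- ===== PORT A =====
-- element.get(k) on a dict passed in as an association list (Python dict semantics via PySem.Dict.ofList)
def pvGet (e : List (String × String)) (k : String) : Option String :=
  (PySem.Dict.ofList e).get? k

-- Python truthiness of `element.get(k)`: None and "" are falsy, any other string truthy
def pvTruthy (o : Option String) : Bool :=
  match o with
  | some s => !(s == "")
  | none => false

-- itemgetter(k): e[k]; A only applies it to elements whose value at k is truthy (hence present), so getD "" is exact there
def pvItem (e : List (String × String)) (k : String) : String :=
  (pvGet e k).getD ""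

def sort_by_key (list_to_sort : List (List (String × String))) (main_key : String) (fallback_key : String) : List (List (String × String)) :=
  let list_elements_with_main_key := list_to_sort.filter (fun e => pvTruthy (pvGet e main_key))
  let sorted_list := PySem.List.sorted list_elements_with_main_key (fun e => pvItem e main_key) false
  if list_to_sort.length == sorted_list.length then sorted_list
  else
    let list_elements_with_fallback_without_main := list_to_sort.filter
      (fun e => pvTruthy (pvGet e fallback_key) && !pvTruthy (pvGet e main_key))
    let sorted_list2 := sorted_list ++ PySem.List.sorted list_elements_with_fallback_without_main (fun e => pvItem e fallback_key) false
    if sorted_list2.length == list_to_sort.length then sorted_list2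
    else
      let list_elements_without_fallback_and_main := list_to_sort.filter
        (fun e => !pvTruthy (pvGet e fallback_key) && !pvTruthy (pvGet e main_key))
      sorted_list2 ++ list_elements_without_fallback_and_main

-- ===== PORT B =====
-- Source B's sort_key(element): the composite (priority, value) tuple
def pvSortKey (e : List (String × String)) (main_key : String) (fallback_key : String) : Int × String :=
  let main_value := pvGet e main_key
  if pvTruthy main_value then (0, main_value.getD "")
  else
    let fallback_value := pvGet e fallback_key
    if pvTruthy fallback_value then (1, fallback_value.getD "")
    else (2, "")

-- sorted(list_to_sort, key=sort_key) with the tuple key (PySem.List.sorted2 is Python's stable sort under a 2-tuple key)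
def sort_by_key_alt (list_to_sort : List (List (String × String))) (main_key : String) (fallback_key : String) : List (List (String × String)) :=
  PySem.List.sorted2 list_to_sort
    (fun e => (pvSortKey e main_key fallback_key).1)
    (fun e => (pvSortKey e main_key fallback_key).2) false

-- ===== PRECONDITION & SPEC =====
def Spec_sort_by_key (list_to_sort : List (List (String × String))) (main_key : String) (fallback_key : String) (out : List (List (String × String))) : Prop := out = sort_by_key_alt list_to_sort main_key fallback_key
instance (list_to_sort : List (List (String × String))) (main_key : String) (fallback_key : String) (out : List (List (String × String))) : Decidable (Spec_sort_by_key list_to_sort main_key fallback_key out) := by unfold Spec_sort_by_key; infer_instance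

-- ===== CLAIM (what is proved, stated in full; the proofs are below) =====
def Claim_equal_sort_by_key : Prop := ∀ (list_to_sort : List (List (String × String))) (main_key : String) (fallback_key : String), Dom_sort_by_key list_to_sort main_key fallback_key → Spec_sort_by_key list_to_sort main_key fallback_key (sort_by_key list_to_sort main_key fallback_key)

-- ===== LEMMAS AND PROOFS =====

-- insertBy puts x in front of a tail it is before everywhere
theorem insertBy_append_all_before {α : Type} (b : α → α → Bool) (x : α) (l1 l2 : List α)
    (h : ∀ y ∈ l2, b x y = true) :
    PySem.List.insertBy b x (l1 ++ l2) = PySem.List.insertBy b x l1 ++ l2 := by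
  induction l1 with
  | nil =>
    cases l2 with
    | nil => rfl
    | cons y ys => simp [PySem.List.insertBy, h y (by simp)]
  | cons z zs ih =>
    by_cases hz : b x z = true
    · simp [PySem.List.insertBy, hz]
    · simp only [Bool.not_eq_true] at hz
      simp [PySem.List.insertBy, hz, ih]

-- insertBy skips a prefix it is nowhere before
theorem insertBy_append_all_not {α : Type} (b : α → α → Bool) (x : α) (l1 l2 : List α)
    (h : ∀ y ∈ l1, b x y = false) :
    PySem.List.insertBy b x (l1 ++ l2) = l1 ++ PySem.List.insertBy b x l2 := by
  induction l1 with
  | nil => rfl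
  | cons z zs ih =>
    simp [PySem.List.insertBy, h z (by simp)]
    exact ih (fun y hy => h y (by simp [hy]))

-- insertBy only looks at b x · on members of the list
theorem insertBy_congr_mem {α : Type} (b1 b2 : α → α → Bool) (x : α) (l : List α)
    (h : ∀ y ∈ l, b1 x y = b2 x y) :
    PySem.List.insertBy b1 x l = PySem.List.insertBy b2 x l := by
  induction l with
  | nil => rfl
  | cons y ys ih =>
    have hy := h y (by simp)
    by_cases h1 : b2 x y = true
    · simp [PySem.List.insertBy, hy, h1]
    · simp only [Bool.not_eq_true] at h1
      simp [PySem.List.insertBy, hy, h1]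
      exact ih (fun z hz => h z (by simp [hz]))

-- one step of the insertion sort, from the right
theorem sorted_snoc {α κ : Type} [LT κ] [DecidableLT κ] (l : List α) (x : α) (key : α → κ) :
    PySem.List.sorted (l ++ [x]) key false
      = PySem.List.insertBy (fun a b => decide (key a < key b)) x (PySem.List.sorted l key false) := by
  simp [PySem.List.sorted, List.foldl_append]

theorem sorted2_snoc {α κ₁ κ₂ : Type} [LT κ₁] [DecidableLT κ₁] [LT κ₂] [DecidableLT κ₂]
    (l : List α) (x : α) (k1 : α → κ₁) (k2 : α → κ₂) :
    PySem.List.sorted2 (l ++ [x]) k1 k2 false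
      = PySem.List.insertBy
          (fun a b => decide (k1 a < k1 b) || !decide (k1 b < k1 a) && decide (k2 a < k2 b))
          x (PySem.List.sorted2 l k1 k2 false) := by
  simp [PySem.List.sorted2, List.foldl_append]

-- the sort only looks at the key on members of the list
theorem sorted_key_congr {α κ : Type} [LT κ] [DecidableLT κ] (l : List α) (k1 k2 : α → κ)
    (h : ∀ y ∈ l, k1 y = k2 y) :
    PySem.List.sorted l k1 false = PySem.List.sorted l k2 false := by
  induction l using List.reverseRecOn with
  | nil => rfl
  | append_singleton l x ih =>
    rw [sorted_snoc, sorted_snoc,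
        ih (fun y hy => h y (by simp [hy]))]
    apply insertBy_congr_mem
    intro y hy
    have hyl : y ∈ l := (PySem.List.mem_sorted _ _ _ _).1 hy
    rw [h x (by simp), h y (by simp [hyl])]

-- THE CORE FACT: a stable sort under the lexicographic key (g, v), where g takes only
-- the values 0/1/2 and v is "" on the g=2 group, is the concatenation of the stably
-- sorted g=0 group, the stably sorted g=1 group, and the g=2 group in input order.
theorem sorted2_three_groups {α : Type} (g : α → Int) (v : α → String)
    (hg : ∀ e, g e = 0 ∨ g e = 1 ∨ g e = 2)
    (h2 : ∀ e, g e = 2 → v e = "")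
    (xs : List α) :
    PySem.List.sorted2 xs g v false
      = PySem.List.sorted (xs.filter (fun e => g e == 0)) v false
        ++ PySem.List.sorted (xs.filter (fun e => g e == 1)) v false
        ++ xs.filter (fun e => g e == 2) := by
  induction xs using List.reverseRecOn with
  | nil => rfl
  | append_singleton l x ih =>
    rw [sorted2_snoc, ih]
    have mem0 : ∀ y ∈ PySem.List.sorted (l.filter (fun e => g e == 0)) v false, g y = 0 := by
      intro y hy
      have := (PySem.List.mem_sorted _ _ _ _).1 hy
      simpa using (List.mem_filter.1 this).2
    have mem1 : ∀ y ∈ PySem.List.sorted (l.filter (fun e => g e == 1)) v false, g y = 1 := by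
      intro y hy
      have := (PySem.List.mem_sorted _ _ _ _).1 hy
      simpa using (List.mem_filter.1 this).2
    have mem2 : ∀ y ∈ l.filter (fun e => g e == 2), g y = 2 := by
      intro y hy; simpa using (List.mem_filter.1 hy).2
    rcases hg x with hx | hx | hx
    · -- x goes to group 0: it is before everything in groups 1 and 2
      rw [List.append_assoc]
      rw [insertBy_append_all_before _ _ _ _ (by
        intro y hy
        rcases List.mem_append.1 hy with hy1 | hy2
        · simp [hx, mem1 y hy1]
        · simp [hx, mem2 y hy2])]
      rw [insertBy_congr_mem
            (fun a b => decide (g a < g b) || !decide (g b < g a) && decide (v a < v b))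
            (fun a b => decide (v a < v b)) x _ (by
        intro y hy; simp [hx, mem0 y hy])]
      simp [List.filter_append, hx, sorted_snoc, List.append_assoc]
    · -- x goes to group 1: after group 0, before group 2
      rw [List.append_assoc]
      rw [insertBy_append_all_not _ _ _ _ (by
        intro y hy; simp [hx, mem0 y hy])]
      rw [insertBy_append_all_before _ _ _ _ (by
        intro y hy; simp [hx, mem2 y hy])]
      rw [insertBy_congr_mem
            (fun a b => decide (g a < g b) || !decide (g b < g a) && decide (v a < v b))
            (fun a b => decide (v a < v b)) x _ (by
        intro y hy; simp [hx, mem1 y hy])]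
      simp [List.filter_append, hx, sorted_snoc, List.append_assoc]
    · -- x goes to group 2: it is before nothing (v is "" throughout the group)
      rw [show PySem.List.sorted (l.filter (fun e => g e == 0)) v false
            ++ PySem.List.sorted (l.filter (fun e => g e == 1)) v false
            ++ l.filter (fun e => g e == 2)
          = (PySem.List.sorted (l.filter (fun e => g e == 0)) v false
            ++ PySem.List.sorted (l.filter (fun e => g e == 1)) v false
            ++ l.filter (fun e => g e == 2)) ++ [] ++ [] by simp]
      rw [List.append_assoc, insertBy_append_all_not _ _ _ _ (by
        intro y hy
        rcases List.mem_append.1 hy with hy' | hy2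
        · rcases List.mem_append.1 hy' with hy0 | hy1
          · simp [hx, mem0 y hy0]
          · simp [hx, mem1 y hy1]
        · have hgy := mem2 y hy2
          simp [hx, hgy, h2 x hx, h2 y hgy])]
      simp [List.filter_append, hx, PySem.List.insertBy, List.append_assoc]

-- the composite key's components in A's vocabulary
theorem sortKey_fst_eq_zero (e : List (String × String)) (mk fk : String) :
    ((pvSortKey e mk fk).1 == 0) = pvTruthy (pvGet e mk) := by
  by_cases h1 : pvTruthy (pvGet e mk) = true <;>
    by_cases h2 : pvTruthy (pvGet e fk) = true <;>
    simp [pvSortKey, h1, h2]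

theorem sortKey_fst_eq_one (e : List (String × String)) (mk fk : String) :
    ((pvSortKey e mk fk).1 == 1) = (pvTruthy (pvGet e fk) && !pvTruthy (pvGet e mk)) := by
  by_cases h1 : pvTruthy (pvGet e mk) = true <;>
    by_cases h2 : pvTruthy (pvGet e fk) = true <;>
    simp [pvSortKey, h1, h2]

theorem sortKey_fst_eq_two (e : List (String × String)) (mk fk : String) :
    ((pvSortKey e mk fk).1 == 2) = (!pvTruthy (pvGet e fk) && !pvTruthy (pvGet e mk)) := by
  by_cases h1 : pvTruthy (pvGet e mk) = true <;>
    by_cases h2 : pvTruthy (pvGet e fk) = true <;>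
    simp [pvSortKey, h1, h2]

-- B in A's vocabulary: the sorted group 0, then the sorted group 1, then group 2 as filtered
theorem alt_eq (list_to_sort : List (List (String × String))) (mk fk : String) :
    sort_by_key_alt list_to_sort mk fk
      = PySem.List.sorted (list_to_sort.filter (fun e => pvTruthy (pvGet e mk)))
          (fun e => pvItem e mk) false
        ++ PySem.List.sorted
            (list_to_sort.filter (fun e => pvTruthy (pvGet e fk) && !pvTruthy (pvGet e mk)))
            (fun e => pvItem e fk) false
        ++ list_to_sort.filter (fun e => !pvTruthy (pvGet e fk) && !pvTruthy (pvGet e mk)) := by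
  rw [sort_by_key_alt,
      sorted2_three_groups (fun e => (pvSortKey e mk fk).1) (fun e => (pvSortKey e mk fk).2)
        (by intro e; by_cases h1 : pvTruthy (pvGet e mk) = true <;>
              by_cases h2 : pvTruthy (pvGet e fk) = true <;> simp [pvSortKey, h1, h2])
        (by intro e he
            by_cases h1 : pvTruthy (pvGet e mk) = true <;>
              by_cases h2 : pvTruthy (pvGet e fk) = true <;>
              simp_all [pvSortKey]) list_to_sort]
  rw [List.filter_congr (fun e _ => sortKey_fst_eq_zero e mk fk),
      List.filter_congr (fun e _ => sortKey_fst_eq_one e mk fk),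
      List.filter_congr (fun e _ => sortKey_fst_eq_two e mk fk)]
  rw [sorted_key_congr (list_to_sort.filter (fun e => pvTruthy (pvGet e mk))) _ (fun e => pvItem e mk) (by
        intro y hy
        have h0 : pvTruthy (pvGet y mk) = true := (List.mem_filter.1 hy).2
        simp [pvSortKey, pvItem, h0]),
      sorted_key_congr (list_to_sort.filter (fun e => pvTruthy (pvGet e fk) && !pvTruthy (pvGet e mk))) _ (fun e => pvItem e fk) (by
        intro y hy
        have h1 : (pvTruthy (pvGet y fk) && !pvTruthy (pvGet y mk)) = true := (List.mem_filter.1 hy).2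
        simp only [Bool.and_eq_true, Bool.not_eq_true'] at h1
        simp [pvSortKey, pvItem, h1.1, h1.2])]

-- the three groups partition the list (length bookkeeping for A's early returns)
theorem three_filter_length (list_to_sort : List (List (String × String))) (mk fk : String) :
    (list_to_sort.filter (fun e => pvTruthy (pvGet e mk))).length
      + (list_to_sort.filter (fun e => pvTruthy (pvGet e fk) && !pvTruthy (pvGet e mk))).length
      + (list_to_sort.filter (fun e => !pvTruthy (pvGet e fk) && !pvTruthy (pvGet e mk))).length
      = list_to_sort.length := by
  induction list_to_sort with
  | nil => rfl
  | cons e l ih =>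
    by_cases h1 : pvTruthy (pvGet e mk) = true <;>
      by_cases h2 : pvTruthy (pvGet e fk) = true <;>
      simp [h1, h2] <;> omega

-- ===== VERDICT (by name: the statement is the Claim_ definition above) =====
theorem sort_by_key_spec : Claim_equal_sort_by_key := by
  intro list_to_sort mk fk _
  show sort_by_key list_to_sort mk fk = sort_by_key_alt list_to_sort mk fk
  rw [alt_eq, sort_by_key]
  simp only []
  split_ifs with hc1 hc2
  · -- all elements have a truthy main key: groups 1 and 2 are empty
    simp only [beq_iff_eq, PySem.List.length_sorted] at hc1
    have hall : ∀ e ∈ list_to_sort, pvTruthy (pvGet e mk) = true := by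
      have := List.length_filter_le (fun e => pvTruthy (pvGet e mk)) list_to_sort
      exact (List.length_filter_eq_length_iff).1 (by omega)
    have e1 : list_to_sort.filter (fun e => pvTruthy (pvGet e fk) && !pvTruthy (pvGet e mk)) = [] := by
      apply List.filter_eq_nil_iff.2
      intro e he; simp [hall e he]
    have e2 : list_to_sort.filter (fun e => !pvTruthy (pvGet e fk) && !pvTruthy (pvGet e mk)) = [] := by
      apply List.filter_eq_nil_iff.2
      intro e he; simp [hall e he]
    simp [e1, e2, PySem.List.sorted]
  · -- groups 0 and 1 exhaust the list: group 2 is empty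
    simp only [beq_iff_eq, List.length_append, PySem.List.length_sorted] at hc2
    have := three_filter_length list_to_sort mk fk
    have e2 : list_to_sort.filter (fun e => !pvTruthy (pvGet e fk) && !pvTruthy (pvGet e mk)) = [] := by
      apply List.eq_nil_of_length_eq_zero
      omega
    simp [e2]
  · -- the general three-group concatenation
    simp [List.append_assoc]
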